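-- pv_equiv track=rewrite | github.com/jchav01/Perudo | Perudo/with IA/Traditional Qlearning/game.py | generate_action_space
-- ===== SOURCE A (Python) =====
-- def generate_action_space(current_bid, total_dice):
--     action_space = [(0, 0)]
--     for a in range(current_bid[0], round(total_dice / 2) + 2):
--         if a == current_bid[0]:
--             for b in range(current_bid[1] + 1, 7):
--                 action_space.append((a, b))
--         else:
--             for b in range(1, 7):
--                 action_space.append((a, b))
--     if current_bid == (1, 0):
--         action_space.remove((0, 0))
--     return action_space
-- ===== SOURCE B (Python) =====
-- def generate_action_space(current_bid, total_dice):
--     q, f = current_bid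
--     hi = round(total_dice / 2) + 2
--     head = [] if current_bid == (1, 0) else [(0, 0)]
--     first = [(q, b) for b in range(f + 1, 7)] if q < hi else []
--     rest = [(q + 1 + i // 6, 1 + i % 6) for i in range(6 * (hi - 1 - q))]
--     return head + first + rest
-- ===== Notes on version B (the rewrite author's own statement) =====
-- stated objective: simpler
-- what changed: Replaces A's in-loop first-row/full-row branch and the post-hoc .remove((0,0)) by a direct concatenation of three independent segments: the sentinel decided up front, the first-row comprehension, and the remaining full rows generated in one flat pass by index arithmetic (i//6, i%6) instead of nested loops.
import Mathlib
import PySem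

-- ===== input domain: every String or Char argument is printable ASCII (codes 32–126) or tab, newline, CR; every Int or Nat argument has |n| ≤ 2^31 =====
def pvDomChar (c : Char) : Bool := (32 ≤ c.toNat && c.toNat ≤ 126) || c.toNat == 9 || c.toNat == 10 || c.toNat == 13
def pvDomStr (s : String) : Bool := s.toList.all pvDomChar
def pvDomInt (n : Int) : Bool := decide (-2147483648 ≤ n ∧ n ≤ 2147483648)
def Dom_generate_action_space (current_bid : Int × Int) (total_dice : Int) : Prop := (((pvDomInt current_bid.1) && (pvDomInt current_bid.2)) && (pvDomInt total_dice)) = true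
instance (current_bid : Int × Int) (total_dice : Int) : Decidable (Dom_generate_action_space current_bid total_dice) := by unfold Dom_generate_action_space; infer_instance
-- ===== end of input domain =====

-- B replaces A's branchy loop + post-hoc remove((0,0)) by a concatenation of three
-- independent segments (sentinel decided up front, first-row comprehension, remaining
-- full rows generated by flat index arithmetic i//6, i%6); objective: simpler.

-- round(total_dice / 2): hand port of Python's round on the float total_dice/2, exact on
-- the stated domain (|total_dice| ≤ 2^31, so total_dice/2 is an exact binary float and
-- round applies banker's rounding: halves go to the nearest even integer).
def pvRoundHalf (d : Int) : Int :=
  let q := PySem.Int.floordiv d 2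
  if PySem.Int.mod d 2 = 0 then q
  else if PySem.Int.mod q 2 = 0 then q else q + 1

-- ===== PORT A =====
def generate_action_space (current_bid : Int × Int) (total_dice : Int) : List (Int × Int) :=
  let action_space : List (Int × Int) := [(0, 0)]
  let action_space :=
    (PySem.List.pyRange current_bid.1 (pvRoundHalf total_dice + 2) 1).foldl
      (fun acc a =>
        if a = current_bid.1 then
          (PySem.List.pyRange (current_bid.2 + 1) 7 1).foldl (fun acc b => acc ++ [(a, b)]) acc
        else
          (PySem.List.pyRange 1 7 1).foldl (fun acc b => acc ++ [(a, b)]) acc)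
      action_space
  if current_bid = (1, 0) then
    -- (0, 0) is always a member here, so list.remove never raises; the none branch is unreachable
    (PySem.List.remove? action_space ((0 : Int), (0 : Int))).getD action_space
  else action_space

-- ===== PORT B =====
def generate_action_space_alt (current_bid : Int × Int) (total_dice : Int) : List (Int × Int) :=
  let q := current_bid.1
  let f := current_bid.2
  let hi := pvRoundHalf total_dice + 2
  let head : List (Int × Int) := if current_bid = (1, 0) then [] else [(0, 0)]
  let first : List (Int × Int) :=
    if q < hi then (PySem.List.pyRange (f + 1) 7 1).map (fun b => (q, b)) else []
  let rest : List (Int × Int) :=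
    (PySem.List.pyRange 0 (6 * (hi - 1 - q)) 1).map
      (fun i => (q + 1 + PySem.Int.floordiv i 6, 1 + PySem.Int.mod i 6))
  head ++ first ++ rest

-- ===== PRECONDITION & SPEC =====
def Spec_generate_action_space (current_bid : Int × Int) (total_dice : Int) (out : List (Int × Int)) : Prop := out = generate_action_space_alt current_bid total_dice
instance (current_bid : Int × Int) (total_dice : Int) (out : List (Int × Int)) : Decidable (Spec_generate_action_space current_bid total_dice out) := by unfold Spec_generate_action_space; infer_instance

-- ===== CLAIM (what is proved, stated in full; the proofs are below) =====
def Claim_equal_generate_action_space : Prop := ∀ (current_bid : Int × Int) (total_dice : Int), Dom_generate_action_space current_bid total_dice → Spec_generate_action_space current_bid total_dice (generate_action_space current_bid total_dice)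

-- ===== LEMMAS AND PROOFS =====

-- the full rows of B, written as the flatMap that A's nested else-loop produces
def pvRows (lo hi : Int) : List (Int × Int) :=
  (PySem.List.pyRange lo hi 1).flatMap (fun a => (PySem.List.pyRange 1 7 1).map (fun b => (a, b)))

lemma pvRange_six (a : Int) : PySem.List.pyRange a (a + 6) 1 = [a, a+1, a+2, a+3, a+4, a+5] := by
  rw [PySem.List.pyRange_one]
  have : (a + 6 - a).toNat = 6 := by omega
  rw [this]; simp [List.range_succ]

-- B's flat divmod pass equals the row-by-row flatMap
lemma pvDivmod_rows (q : Int) (k : Nat) :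
    (PySem.List.pyRange 0 (6 * (k : Int)) 1).map
      (fun i => (q + 1 + PySem.Int.floordiv i 6, 1 + PySem.Int.mod i 6))
    = pvRows (q + 1) (q + 1 + k) := by
  induction k with
  | zero => simp [pvRows, PySem.List.pyRange_one_eq_nil]
  | succ n ih =>
    have hc : (6 * ((n + 1 : Nat) : Int)) = 6 * (n : Int) + 6 := by push_cast; ring
    have hc2 : q + 1 + ((n + 1 : Nat) : Int) = q + 1 + (n : Int) + 1 := by push_cast; ring
    have hsplit := PySem.List.pyRange_one_append 0 (6 * (n : Int)) (6 * (n : Int) + 6)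
      (by positivity) (by omega)
    have hr := PySem.List.pyRange_one_succ_right (a := q + 1) (b := q + 1 + (n : Int)) (by omega)
    rw [hc, hsplit, List.map_append, ih]
    unfold pvRows
    rw [hc2, hr, List.flatMap_append]
    congr 1
    rw [pvRange_six (6 * (n : Int)), show (7:Int) = 1 + 6 by norm_num, pvRange_six 1]
    simp only [List.flatMap_cons, List.flatMap_nil, List.append_nil, List.map_cons, List.map_nil]
    simp only [PySem.Int.floordiv_eq_ediv_of_pos (by norm_num : (0:Int) < 6),
      PySem.Int.mod_eq_emod_of_pos (by norm_num : (0:Int) < 6)]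
    simp only [List.cons.injEq, Prod.mk.injEq, and_true]
    omega

-- A's outer loop over a-values strictly above current_bid[0] only takes the else branch
lemma pvFold_else (q hi : Int) (g : List (Int × Int) → Int → List (Int × Int)) (lo : Int)
    (hlo : q < lo) (acc : List (Int × Int)) :
    (PySem.List.pyRange lo hi 1).foldl
      (fun acc a => if a = q then g acc a
        else acc ++ (PySem.List.pyRange 1 7 1).map (fun b => (a, b))) acc
    = acc ++ pvRows lo hi := by
  generalize hn : (hi - lo).toNat = n
  induction n generalizing lo acc with
  | zero =>
    have h0 : hi ≤ lo := by omega
    rw [PySem.List.pyRange_one_eq_nil h0]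
    simp [pvRows, PySem.List.pyRange_one_eq_nil h0]
  | succ n ih =>
    have hlt : lo < hi := by omega
    rw [PySem.List.pyRange_one_cons hlt]
    simp only [List.foldl_cons]
    rw [if_neg (by omega : ¬ lo = q)]
    rw [ih (lo + 1) (by omega) _ (by omega)]
    unfold pvRows
    rw [PySem.List.pyRange_one_cons hlt, List.flatMap_cons, List.append_assoc]

-- ===== VERDICT (by name: the statement is the Claim_ definition above) =====
theorem generate_action_space_spec : Claim_equal_generate_action_space := by
  intro current_bid total_dice _
  unfold Spec_generate_action_space
  obtain ⟨q, f⟩ := current_bid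
  simp only [generate_action_space, generate_action_space_alt,
    PySem.List.foldl_append_singleton_eq_map]
  set hi := pvRoundHalf total_dice + 2 with hhi
  by_cases hq : q < hi
  · have hk : hi = q + 1 + ((hi - 1 - q).toNat : Int) := by omega
    have hb : 6 * (hi - 1 - q) = 6 * (((hi - 1 - q).toNat : Nat) : Int) := by omega
    rw [if_pos hq, hb, pvDivmod_rows q (hi - 1 - q).toNat, ← hk]
    conv_lhs => rw [hk]
    rw [PySem.List.pyRange_one_cons (by omega : q < q + 1 + ((hi - 1 - q).toNat : Int))]
    simp only [List.foldl_cons, if_pos]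
    rw [pvFold_else q _ _ (q + 1) (by omega) _]
    by_cases hbid : ((q, f) : Int × Int) = (1, 0)
    · rw [if_pos hbid, if_pos hbid]
      simp only [PySem.List.remove?_cons_self, Option.getD_some, List.cons_append,
        List.nil_append, List.append_cancel_left_eq]
      congr 1
      omega
    · rw [if_neg hbid, if_neg hbid]
      simp only [List.cons_append, List.nil_append, List.cons.injEq, true_and, List.append_cancel_left_eq]
      congr 1
      omega
  · rw [if_neg hq]
    rw [PySem.List.pyRange_one_eq_nil (by omega : hi ≤ q)]
    rw [PySem.List.pyRange_one_eq_nil (by omega : 6 * (hi - 1 - q) ≤ 0)]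
    simp only [List.foldl_nil, List.map_nil, List.append_nil]
    by_cases hbid : ((q, f) : Int × Int) = (1, 0)
    · rw [if_pos hbid, if_pos hbid]
      simp [PySem.List.remove?_cons_self]
    · rw [if_neg hbid, if_neg hbid]
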